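-- pv_equiv track=rewrite | github.com/nickchen111/Leetcode | Dynamic_Programming/3592. Inverse Coin Change.py | findCoins
-- ===== SOURCE A (Python) =====
-- from typing import List
--
-- def findCoins(numWays: List[int]) -> List[int]:
--     '''
--     有多少方法可以獲取某個數值 類似背包求方法數量 現在倒過來去選擇有哪些
--     每個都去做背包 如果遇到某一個少1 就把自己新增上去
--     '''
--     st = set()
--     n = len(numWays)
--     for i, way in enumerate(numWays):
--         num = i + 1
--         dp = [0] * (num + 1)
--         dp[0] = 1
--         for x in st:
--             for c in range(1, num + 1):
--                 if x > c:
--                     continue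
--                 dp[c] += dp[c - x]
--         if dp[num] + 1 == way:
--             st.add(num)
--         elif dp[num] != way:
--             return []
--     return list(sorted(st))
-- ===== SOURCE B (Python) =====
-- from typing import List
--
-- def findCoins(numWays: List[int]) -> List[int]:
--     # Incremental knapsack: keep one dp array of ways; when position i shows one
--     # extra way, coin i exists -- fold it into dp with a single pass.
--     n = len(numWays)
--     dp = [0] * (n + 1)
--     dp[0] = 1
--     coins = []
--     for i in range(1, n + 1):
--         w = numWays[i - 1]
--         if dp[i] + 1 == w:
--             coins.append(i)
--             for c in range(i, n + 1):
--                 dp[c] += dp[c - i]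
--         elif dp[i] != w:
--             return []
--     return coins
-- ===== Notes on version B (the rewrite author's own statement) =====
-- stated objective: alternative
-- what changed: Instead of rebuilding the whole knapsack dp array from scratch over the coin set at every position (A), B maintains a single dp array of way-counts incrementally and folds each newly discovered coin into it with one pass.
import Mathlib
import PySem

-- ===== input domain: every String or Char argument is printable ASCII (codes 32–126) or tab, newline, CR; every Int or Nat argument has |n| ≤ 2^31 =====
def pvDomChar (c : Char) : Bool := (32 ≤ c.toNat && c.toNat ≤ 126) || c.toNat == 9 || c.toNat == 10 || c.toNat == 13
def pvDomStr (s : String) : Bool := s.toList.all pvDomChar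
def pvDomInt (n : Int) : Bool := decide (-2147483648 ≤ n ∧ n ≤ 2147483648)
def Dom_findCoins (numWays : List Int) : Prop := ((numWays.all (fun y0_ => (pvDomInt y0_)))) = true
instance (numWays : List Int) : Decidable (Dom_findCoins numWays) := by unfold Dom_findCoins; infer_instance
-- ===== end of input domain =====

-- B maintains one dp array of way-counts incrementally (one linear pass per discovered coin)
-- instead of A's full knapsack recomputation over the coin set at every position.


-- ===== PORT A =====
-- A's inner double loop body: for c in range(1, num+1): if x > c: continue; dp[c] += dp[c-x]
def pvACoin (num : Nat) (d : List Int) (x : Int) : List Int :=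
  (List.range' 1 num).foldl (fun (d : List Int) (c : Nat) =>
    if x > (c : Int) then d else d.set c (d.getD c 0 + d.getD (c - x.toNat) 0)) d

-- A's enumerate loop: i the current index, st the set built so far; none = the early 'return []'
def pvAGo : List Int → Nat → PySem.Set Int → Option (PySem.Set Int)
  | [], _, st => some st
  | way :: rest, i, st =>
    let num := i + 1
    let dp := st.foldl (pvACoin num) (1 :: List.replicate num 0)
    if dp.getD num 0 + 1 = way then pvAGo rest (i + 1) (PySem.Set.add st (num : Int))
    else if dp.getD num 0 = way then pvAGo rest (i + 1) st
    else none

def findCoins (numWays : List Int) : List Int :=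
  match pvAGo numWays 0 PySem.Set.empty with
  | some st => PySem.List.sorted st (fun x => x) false
  | none => []

-- ===== PORT B =====
-- fold coin i into dp: for c in range(i, n+1): dp[c] += dp[c-i]
def pvBAdd (i n : Nat) (dp : List Int) : List Int :=
  (List.range' i (n + 1 - i)).foldl (fun d c => d.set c (d.getD c 0 + d.getD (c - i) 0)) dp

-- B's main loop over i = 1..n, carrying dp and the coins found so far; none = the early 'return []'
def pvBGo (numWays : List Int) (n : Nat) : List Nat → List Int → List Int → Option (List Int)
  | [], _, coins => some coins
  | i :: rest, dp, coins =>
    let w := numWays.getD (i - 1) 0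
    if dp.getD i 0 + 1 = w then pvBGo numWays n rest (pvBAdd i n dp) (coins ++ [(i : Int)])
    else if dp.getD i 0 = w then pvBGo numWays n rest dp coins
    else none

def findCoins_alt (numWays : List Int) : List Int :=
  let n := numWays.length
  match pvBGo numWays n (List.range' 1 n) (1 :: List.replicate n 0) [] with
  | some coins => coins
  | none => []

-- ===== PRECONDITION & SPEC =====
def Spec_findCoins (numWays : List Int) (out : List Int) : Prop := out = findCoins_alt numWays
instance (numWays : List Int) (out : List Int) : Decidable (Spec_findCoins numWays out) := by unfold Spec_findCoins; infer_instance

-- ===== CLAIM (what is proved, stated in full; the proofs are below) =====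
def Claim_equal_findCoins : Prop := ∀ (numWays : List Int), Dom_findCoins numWays → Spec_findCoins numWays (findCoins numWays)

-- ===== LEMMAS AND PROOFS =====

def stepF (x : Nat) (d : Nat → Int) (c : Nat) : Int :=
  d c + (if h : 1 ≤ x ∧ x ≤ c then stepF x d (c - x) else 0)
termination_by c
decreasing_by omega

theorem stepF_congr (x : Nat) (f g : Nat → Int) (j : Nat) (h : ∀ c ≤ j, f c = g c) :
    stepF x f j = stepF x g j := by
  induction j using Nat.strong_induction_on with
  | _ j ih =>
    conv_lhs => rw [stepF]
    conv_rhs => rw [stepF]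
    rw [h j le_rfl]
    split
    · next hc => rw [ih (j - x) (by omega) (fun c hc2 => h c (by omega))]
    · rfl

def loopG (x : Nat) (d : List Int) (cs : List Nat) : List Int :=
  cs.foldl (fun d c => if x > c then d else d.set c (d.getD c 0 + d.getD (c - x) 0)) d

theorem loopG_length (x : Nat) (d : List Int) (cs : List Nat) :
    (loopG x d cs).length = d.length := by
  induction cs generalizing d with
  | nil => rfl
  | cons c cs ih =>
    simp only [loopG, List.foldl_cons] at *
    split <;> rw [ih] <;> simp

theorem loopG_skip (x : Nat) (d : List Int) (cs : List Nat) (h : ∀ c ∈ cs, c < x) :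
    loopG x d cs = d := by
  induction cs with
  | nil => rfl
  | cons c cs ih =>
    simp only [loopG, List.foldl_cons]
    rw [if_pos (h c (by simp))]
    exact ih (fun c hc => h c (by simp [hc]))

theorem loopG_append (x : Nat) (d : List Int) (as bs : List Nat) :
    loopG x d (as ++ bs) = loopG x (loopG x d as) bs := by
  simp [loopG, List.foldl_append]

theorem loopG_singleton (x : Nat) (d : List Int) (c : Nat) :
    loopG x d [c] = if x > c then d else d.set c (d.getD c 0 + d.getD (c - x) 0) := rfl

theorem loopG_spec (x : Nat) (hx : 1 ≤ x) (d : List Int) (m : Nat) (hm : m < d.length) (j : Nat) :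
    (loopG x d (List.range' 1 m)).getD j 0 =
      if j ≤ m then stepF x (fun c => d.getD c 0) j else d.getD j 0 := by
  induction m generalizing j with
  | zero =>
    simp only [List.range'_zero, loopG, List.foldl_nil]
    split
    · next hj =>
      have : j = 0 := by omega
      subst this
      rw [stepF]; simp; omega
    · rfl
  | succ m ih =>
    have hm' : m < d.length := by omega
    have hconcat : List.range' 1 (m+1) = List.range' 1 m ++ [m + 1] := by
      rw [List.range'_concat]; simp [Nat.add_comm]
    rw [hconcat, loopG_append, loopG_singleton]
    have hlen : (loopG x d (List.range' 1 m)).length = d.length := loopG_length x d _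
    by_cases hcase : x > m + 1
    · -- guard skips
      rw [if_pos hcase, ih hm' j]
      by_cases hj : j ≤ m
      · simp [hj, Nat.le_succ_of_le hj]
      · by_cases hj2 : j ≤ m + 1
        · have : j = m + 1 := by omega
          subst this
          simp only [hj, if_neg, if_pos hj2, ite_eq_right_iff]
          rw [stepF]
          simp only [show ¬(1 ≤ x ∧ x ≤ m + 1) by omega, dif_neg, not_false_iff, add_zero]
          simp [hj]
        · simp [hj, hj2]
    · -- update at c = m+1
      rw [if_neg hcase]
      by_cases hj : j = m + 1
      · subst hj
        rw [List.getD_eq_getElem?_getD, List.getElem?_set_self (by omega : m + 1 < (loopG x d (List.range' 1 m)).length)]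
        simp only [Option.getD_some]
        rw [if_pos le_rfl]
        -- value: r.getD (m+1) + r.getD (m+1-x) = stepF x d (m+1)
        rw [ih hm' (m+1), ih hm' (m+1-x)]
        rw [if_neg (by omega), if_pos (by omega : m + 1 - x ≤ m)]
        conv_rhs => rw [stepF]
        rw [dif_pos ⟨hx, by omega⟩]
      · rw [List.getD_eq_getElem?_getD, List.getElem?_set_ne (by omega : m + 1 ≠ j), ← List.getD_eq_getElem?_getD]
        rw [ih hm' j]
        by_cases hj2 : j ≤ m
        · simp [hj2, Nat.le_succ_of_le hj2]
        · simp [hj2, show ¬ j ≤ m + 1 by omega]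

def wfun (cs : List Nat) : Nat → Int :=
  cs.foldl (fun d x => stepF x d) (fun c => if c = 0 then 1 else 0)

theorem pvACoin_cast (num : Nat) (d : List Int) (k : Nat) :
    pvACoin num d (k : Int) = loopG k d (List.range' 1 num) := by
  unfold pvACoin loopG
  congr 1
  funext d c
  by_cases h : k > c
  · rw [if_pos (by exact_mod_cast h), if_pos h]
  · rw [if_neg (by exact_mod_cast h), if_neg h, Int.toNat_natCast]

theorem loopG_noguard (x : Nat) (d : List Int) (cs : List Nat) (h : ∀ c ∈ cs, x ≤ c) :
    loopG x d cs = cs.foldl (fun d c => d.set c (d.getD c 0 + d.getD (c - x) 0)) d := by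
  induction cs generalizing d with
  | nil => rfl
  | cons c cs ih =>
    simp only [loopG, List.foldl_cons] at *
    rw [if_neg (by have := h c (by simp); omega)]
    exact ih _ (fun c hc => h c (by simp [hc]))

theorem pvBAdd_eq_loopG (x n : Nat) (d : List Int) (hx1 : 1 ≤ x) (hxn : x ≤ n) :
    pvBAdd x n d = loopG x d (List.range' 1 n) := by
  have hsplit : List.range' 1 n = List.range' 1 (x - 1) ++ List.range' x (n + 1 - x) := by
    have := @List.range'_append 1 (x - 1) (n + 1 - x) 1
    simp only [Nat.mul_one, Nat.one_mul] at this
    rw [show 1 + (x - 1) = x by omega, show x - 1 + (n + 1 - x) = n by omega] at this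
    exact this.symm
  rw [hsplit, loopG_append, loopG_skip x d _ (by intro c hc; have := List.mem_range'.mp hc; omega)]
  rw [loopG_noguard x d _ (by intro c hc; have := List.mem_range'.mp hc; omega)]
  rfl

theorem wfun_append (cs : List Nat) (x : Nat) :
    wfun (cs ++ [x]) = stepF x (wfun cs) := by
  simp [wfun, List.foldl_append]

theorem agree_fold (m : Nat) (cs : List Nat) (hcs : ∀ k ∈ cs, 1 ≤ k) :
    ∀ (d : List Int) (f : Nat → Int), m < d.length → (∀ j ≤ m, d.getD j 0 = f j) →
    ((cs.foldl (fun d k => loopG k d (List.range' 1 m)) d).length = d.length ∧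
     ∀ j ≤ m, (cs.foldl (fun d k => loopG k d (List.range' 1 m)) d).getD j 0
        = (cs.foldl (fun g k => stepF k g) f) j) := by
  induction cs with
  | nil => exact fun d f _ h => ⟨rfl, h⟩
  | cons k cs ih =>
    intro d f hm h
    have hk : 1 ≤ k := hcs k (by simp)
    have hstep : ∀ j ≤ m, (loopG k d (List.range' 1 m)).getD j 0 = stepF k f j := by
      intro j hj
      rw [loopG_spec k hk d m hm j, if_pos hj]
      exact stepF_congr k _ f j (fun c hc => h c (le_trans hc hj))
    have hlen : (loopG k d (List.range' 1 m)).length = d.length := loopG_length k d _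
    have := ih (fun k hk => hcs k (by simp [hk])) (loopG k d (List.range' 1 m)) (stepF k f)
      (by omega) hstep
    simp only [List.foldl_cons]
    exact ⟨by rw [this.1, hlen], this.2⟩

theorem base_agree (n : Nat) : ∀ j ≤ n, (1 :: List.replicate n (0:Int)).getD j 0 = wfun [] j := by
  intro j hj
  cases j with
  | zero => rfl
  | succ t =>
    simp only [List.getD_cons_succ, wfun, List.foldl_nil]
    rw [List.getD_eq_getElem?_getD, List.getElem?_replicate]
    split <;> simp

theorem go_eq (numWays : List Int) (n : Nat) (hn : n = numWays.length) :
    ∀ (rest : List Int) (i : Nat), rest = numWays.drop i → i + rest.length = n →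
    ∀ (cs : List Nat), (∀ k ∈ cs, 1 ≤ k ∧ k ≤ i) → cs.Pairwise (· < ·) →
    ∀ (dp : List Int), dp.length = n + 1 → (∀ j ≤ n, dp.getD j 0 = wfun cs j) →
    (pvAGo rest i (cs.map (fun k : Nat => (k : Int)))).map
        (fun s => PySem.List.sorted s (fun x : Int => x) false) =
      pvBGo numWays n (List.range' (i + 1) rest.length) dp (cs.map (fun k : Nat => (k : Int))) := by
  intro rest
  induction rest with
  | nil =>
    intro i _ _ cs hcs hsort dp _ _
    simp only [List.length_nil, List.range'_zero, pvAGo, pvBGo, Option.map_some]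
    rw [PySem.List.sorted_eq_self_of_pairwise]
    exact List.pairwise_map.mpr (hsort.imp (fun {a b} h => by exact_mod_cast Nat.le_of_lt h))
  | cons way rs ih =>
    intro i hrest hlen cs hcs hsort dp hdplen hdp
    have hin : i + 1 ≤ n := by rw [List.length_cons] at hlen; omega
    -- the A-side dp value at num = i+1
    have hAdp : ((cs.map (fun k : Nat => (k : Int))).foldl (pvACoin (i+1))
        (1 :: List.replicate (i+1) 0)).getD (i+1) 0 = wfun cs (i+1) := by
      rw [List.foldl_map]
      simp only [pvACoin_cast]
      exact (agree_fold (i+1) cs (fun k hk => (hcs k hk).1) _ (wfun [])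
        (by simp) (base_agree (i+1))).2 (i+1) le_rfl
    -- the B-side reads the same way value
    have hway : numWays.getD i 0 = way := by
      rw [List.getD_eq_getElem?_getD, ← Nat.add_zero i, ← List.getElem?_drop, ← hrest]
      rfl
    have hdpi : dp.getD (i+1) 0 = wfun cs (i+1) := hdp (i+1) hin
    -- unfold one step of both loops
    have hrange : List.range' (i + 1) (way :: rs).length = (i+1) :: List.range' (i+2) rs.length := by
      simp [List.range'_succ]
    rw [hrange]
    show _ = pvBGo numWays n ((i+1) :: List.range' (i+2) rs.length) dp _
    simp only [pvAGo, pvBGo, hAdp, hdpi, Nat.add_sub_cancel, hway]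
    have hrs : rs = numWays.drop (i + 1) := by
      have : (way :: rs).drop 1 = (numWays.drop i).drop 1 := by rw [hrest]
      simpa [List.drop_drop, Nat.add_comm] using this
    by_cases hb1 : wfun cs (i+1) + 1 = way
    · rw [if_pos hb1, if_pos hb1]
      have hnotmem : ((i+1 : Nat) : Int) ∉ cs.map (fun k : Nat => (k : Int)) := by
        intro hmem
        rcases List.mem_map.mp hmem with ⟨k, hk, hkeq⟩
        have : k = i + 1 := by exact_mod_cast hkeq
        have := (hcs k hk).2
        omega
      rw [PySem.Set.add_of_not_mem hnotmem]
      have hmapcat : (cs.map (fun k : Nat => (k : Int))) ++ [((i+1 : Nat) : Int)]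
          = (cs ++ [i+1]).map (fun k : Nat => (k : Int)) := by simp
      rw [hmapcat]
      have hdp' : ∀ j ≤ n, (pvBAdd (i+1) n dp).getD j 0 = wfun (cs ++ [i+1]) j := by
        intro j hj
        rw [pvBAdd_eq_loopG (i+1) n dp (by omega) hin,
          loopG_spec (i+1) (by omega) dp n (by omega) j, if_pos hj, wfun_append]
        exact stepF_congr (i+1) _ (wfun cs) j (fun c hc => hdp c (le_trans hc hj))
      have hlen' : (pvBAdd (i+1) n dp).length = n + 1 := by
        rw [pvBAdd_eq_loopG (i+1) n dp (by omega) hin, loopG_length, hdplen]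
      refine ih (i+1) hrs (by rw [List.length_cons] at hlen; omega) (cs ++ [i+1])
        (by intro k hk; rcases List.mem_append.mp hk with h | h
            · have := hcs k h; omega
            · simp at h; omega)
        (by rw [List.pairwise_append]
            refine ⟨hsort, by simp, ?_⟩
            intro a ha b hb; simp at hb; subst hb
            have := (hcs a ha).2; omega)
        _ hlen' hdp'
    · rw [if_neg hb1, if_neg hb1]
      by_cases hb2 : wfun cs (i+1) = way
      · rw [if_pos hb2, if_pos hb2]
        exact ih (i+1) hrs (by rw [List.length_cons] at hlen; omega) cs
          (fun k hk => ⟨(hcs k hk).1, by have := (hcs k hk).2; omega⟩) hsort dp hdplen hdp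
      · rw [if_neg hb2, if_neg hb2]
        rfl

theorem findCoins_eq (numWays : List Int) : findCoins numWays = findCoins_alt numWays := by
  have h := go_eq numWays numWays.length rfl numWays 0 (by simp) (by simp) []
    (by simp) (by simp) (1 :: List.replicate numWays.length 0) (by simp) (base_agree _)
  simp only [List.map_nil] at h
  unfold findCoins findCoins_alt
  rw [show (0:Nat) + 1 = 1 from rfl] at h
  cases hA : pvAGo numWays 0 PySem.Set.empty with
  | none =>
    rw [show PySem.Set.empty = ([] : List Int) from rfl] at hA
    rw [hA] at h
    simp only [Option.map_none] at h
    simp only [← h]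
  | some st =>
    rw [show PySem.Set.empty = ([] : List Int) from rfl] at hA
    rw [hA] at h
    simp only [Option.map_some] at h
    simp only [← h]

-- ===== VERDICT (by name: the statement is the Claim_ definition above) =====
theorem findCoins_spec : Claim_equal_findCoins := by
  intro numWays _
  unfold Spec_findCoins
  exact findCoins_eq numWays
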